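-- pv_equiv track=rewrite | github.com/SajedurRahmanFiad/AI-support-system-architecture | app/services/orchestrator.py | _extract_fallback_reply_text
-- ===== SOURCE A (Python) =====
-- def _extract_fallback_reply_text(content: str) -> str | None:
--     normalized = " ".join((content or "").strip().split())
--     if not normalized:
--         return None
--
--     sentences: list[str] = []
--     buffer: list[str] = []
--     for char in normalized:
--         buffer.append(char)
--         if char in ".!?।":
--             sentence = "".join(buffer).strip()
--             if sentence:
--                 sentences.append(sentence)
--             buffer = []
--             if len(sentences) >= 2 or len(" ".join(sentences)) >= 220:
--                 break
--
--     if buffer and not sentences: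
--         sentences.append("".join(buffer).strip())
--
--     candidate = " ".join(item for item in sentences if item).strip()
--     if not candidate:
--         candidate = normalized[:280].rsplit(" ", 1)[0].strip() or normalized[:280].strip()
--
--     return candidate[:280].strip() or None
-- ===== SOURCE B (Python) =====
-- def _split_first(text):
--     """Return (first sentence stripped, remainder) or (None, text) if no terminator."""
--     for i, ch in enumerate(text):
--         if ch in ".!?।":
--             return text[:i + 1].strip(), text[i + 1:]
--     return None, text
--
--
-- def _extract_fallback_reply_text(content: str) -> str | None:
--     normalized = " ".join((content or "").strip().split())
--     if not normalized:
--         return None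
--
--     first, rest = _split_first(normalized)
--     if first is None:
--         candidate = normalized
--     elif len(first) >= 220:
--         candidate = first
--     else:
--         second, _ = _split_first(rest)
--         candidate = first if second is None else first + " " + second
--
--     return candidate[:280].strip() or None
-- ===== Notes on version B (the rewrite author's own statement) =====
-- stated objective: simpler
-- what changed: B replaces A's char-by-char buffer loop with a direct split at the first (and possibly second) terminator via index slicing - the post-add break means at most two sentences are ever kept - and drops A's unreachable empty-candidate rsplit fallback.
import Mathlib
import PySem

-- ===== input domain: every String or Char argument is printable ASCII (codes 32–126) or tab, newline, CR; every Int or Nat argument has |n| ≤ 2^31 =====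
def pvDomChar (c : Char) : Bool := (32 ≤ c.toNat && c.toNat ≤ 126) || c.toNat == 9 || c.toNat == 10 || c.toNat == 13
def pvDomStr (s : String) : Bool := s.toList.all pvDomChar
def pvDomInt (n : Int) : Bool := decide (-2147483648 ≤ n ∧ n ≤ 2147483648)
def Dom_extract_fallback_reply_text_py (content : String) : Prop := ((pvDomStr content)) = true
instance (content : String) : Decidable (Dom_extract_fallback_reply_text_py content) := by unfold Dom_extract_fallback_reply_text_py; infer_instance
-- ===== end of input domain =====

-- B extracts at most the first two terminator-delimited sentences directly by index slicing
-- (A's post-add break caps the list at two) and drops A's unreachable rsplit fallback: simpler.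


-- ===== PORT A =====
-- char in ".!?।"
def pvIsTerm (c : Char) : Bool := c == '.' || c == '!' || c == '?' || c == '।'

-- A's for-loop over the characters; state = (sentences, buffer); break returns immediately.
def pvLoopA : List Char → List (List Char) → List Char → List (List Char) × List Char
  | [], ss, buf => (ss, buf)
  | c :: rest, ss, buf =>
    let buf' := buf ++ [c]
    if pvIsTerm c then
      let s := PySem.Chars.strip buf'
      let ss' := if s ≠ [] then ss ++ [s] else ss
      if 2 ≤ ss'.length ∨ 220 ≤ (PySem.Chars.join [' '] ss').length then (ss', [])
      else pvLoopA rest ss' []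
    else pvLoopA rest ss buf'

-- exact hand port: t.rsplit(" ", 1)[0] is the part before the LAST space, or t itself when no space occurs
def pvRsplitHead (t : List Char) : List Char :=
  match t.reverse.findIdx? (fun c => c == ' ') with
  | none => t
  | some k => t.take (t.length - 1 - k)

def extract_fallback_reply_text_py (content : String) : Option String :=
  -- (content or "") = content for a str argument
  let normalized := PySem.Chars.join [' '] (PySem.Chars.split₀ (PySem.Chars.strip content.toList))
  if normalized = [] then none
  else
    let res := pvLoopA normalized [] []
    let sentences := if res.2 ≠ [] ∧ res.1 = [] then res.1 ++ [PySem.Chars.strip res.2] else res.1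
    let candidate := PySem.Chars.strip (PySem.Chars.join [' '] (sentences.filter (fun t => !t.isEmpty)))
    let candidate := if candidate = [] then
        (let c' := PySem.Chars.strip (pvRsplitHead (PySem.List.slice normalized none (some 280)))
         if c' ≠ [] then c' else PySem.Chars.strip (PySem.List.slice normalized none (some 280)))
      else candidate
    let r := PySem.Chars.strip (PySem.List.slice candidate none (some 280))
    if r = [] then none else some (String.ofList r)

-- ===== PORT B =====
-- Source B's _split_first: scan with the running index i; text[:i+1] / text[i+1:] are take/drop (i ≥ 0)
def pvSplitGo : List Char → Nat → List Char → Option (List Char) × List Char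
  | [], _, t => (none, t)
  | c :: rest, i, t =>
    if pvIsTerm c then (some (PySem.Chars.strip (t.take (i + 1))), t.drop (i + 1))
    else pvSplitGo rest (i + 1) t

def extract_fallback_reply_text_py_alt (content : String) : Option String :=
  let normalized := PySem.Chars.join [' '] (PySem.Chars.split₀ (PySem.Chars.strip content.toList))
  if normalized = [] then none
  else
    let fr := pvSplitGo normalized 0 normalized
    let candidate :=
      match fr.1 with
      | none => normalized
      | some first =>
        if 220 ≤ first.length then first
        else
          match (pvSplitGo fr.2 0 fr.2).1 with
          | none => first
          | some second => first ++ [' '] ++ second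
    let r := PySem.Chars.strip (PySem.List.slice candidate none (some 280))
    if r = [] then none else some (String.ofList r)

-- ===== PRECONDITION & SPEC =====
def Spec_extract_fallback_reply_text_py (content : String) (out : Option String) : Prop := out = extract_fallback_reply_text_py_alt content
instance (content : String) (out : Option String) : Decidable (Spec_extract_fallback_reply_text_py content out) := by unfold Spec_extract_fallback_reply_text_py; infer_instance

-- ===== CLAIM (what is proved, stated in full; the proofs are below) =====
def Claim_equal_extract_fallback_reply_text_py : Prop := ∀ (content : String), Dom_extract_fallback_reply_text_py content → Spec_extract_fallback_reply_text_py content (extract_fallback_reply_text_py content)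

-- ===== LEMMAS AND PROOFS =====

-- a list whose first and last characters (if any) are not whitespace
def pvGood (l : List Char) : Prop :=
  (∀ c, l.head? = some c → PySem.Chars.isspace c = false) ∧
  (∀ c, l.getLast? = some c → PySem.Chars.isspace c = false)

theorem pvTerm_not_space {c : Char} (h : pvIsTerm c = true) : PySem.Chars.isspace c = false := by
  simp [pvIsTerm] at h
  rcases h with ((h | h) | h) | h <;> subst h <;> decide

theorem pvDropWhile_head {p : Char → Bool} {l : List Char} {a : Char}
    (h : l.head? = some a) (h2 : p a = false) : l.dropWhile p = l := by
  cases l with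
  | nil => simp at h
  | cons b t => simp at h; subst h; simp [h2]

theorem pvLstrip_eq {l : List Char}
    (h : ∀ c, l.head? = some c → PySem.Chars.isspace c = false) :
    PySem.Chars.lstrip l = l := by
  cases hl : l.head? with
  | none => simp at hl; simp [hl, PySem.Chars.lstrip]
  | some a => exact pvDropWhile_head hl (h a hl)

theorem pvRstrip_eq {l : List Char}
    (h : ∀ c, l.getLast? = some c → PySem.Chars.isspace c = false) :
    PySem.Chars.rstrip l = l := by
  have : l.reverse.dropWhile PySem.Chars.isspace = l.reverse := by
    cases hl : l.reverse.head? with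
    | none => simp at hl; simp [hl]
    | some a =>
      refine pvDropWhile_head hl (h a ?_)
      rwa [List.head?_reverse] at hl
  simp [PySem.Chars.rstrip, this]

theorem pvGood_strip_eq {l : List Char} (h : pvGood l) : PySem.Chars.strip l = l := by
  rw [PySem.Chars.strip, pvLstrip_eq h.1, pvRstrip_eq h.2]

theorem pvHead_dropWhile {p : Char → Bool} {l : List Char} {a : Char}
    (h : (l.dropWhile p).head? = some a) : p a = false := by
  have hw : l.dropWhile p ≠ [] := by intro h0; rw [h0] at h; simp at h
  have := List.head_dropWhile_not (p := p) (l := l) hw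
  rw [List.head?_eq_some_head hw] at h
  simp at h
  rw [h] at this
  exact this

theorem pvLstrip_append {l : List Char} {c : Char} (hc : PySem.Chars.isspace c = false) :
    PySem.Chars.lstrip (l ++ [c]) = PySem.Chars.lstrip l ++ [c] := by
  rw [PySem.Chars.lstrip, List.dropWhile_append]
  split
  · next he =>
    rw [List.isEmpty_iff] at he
    rw [PySem.Chars.lstrip, he]
    simp [hc]
  · rfl

theorem pvStrip_append_term {l : List Char} {c : Char} (hc : PySem.Chars.isspace c = false) :
    PySem.Chars.strip (l ++ [c]) = PySem.Chars.lstrip l ++ [c] := by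
  rw [PySem.Chars.strip, pvLstrip_append hc]
  refine pvRstrip_eq ?_
  intro d hd
  simp at hd
  subst hd; exact hc

theorem pvGood_lstrip_append {l : List Char} {c : Char} (hc : PySem.Chars.isspace c = false) :
    pvGood (PySem.Chars.lstrip l ++ [c]) := by
  constructor
  · intro d hd
    cases he : PySem.Chars.lstrip l with
    | nil => rw [he] at hd; simp at hd; subst hd; exact hc
    | cons a t =>
      rw [he] at hd
      simp at hd
      subst hd
      refine pvHead_dropWhile (l := l) ?_
      rw [PySem.Chars.lstrip] at he
      simp [he]
  · intro d hd
    simp at hd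
    subst hd; exact hc

theorem pvGood_mid {s1 s2 : List Char} (h1 : pvGood s1) (h2 : pvGood s2)
    (n1 : s1 ≠ []) (n2 : s2 ≠ []) : pvGood (s1 ++ [' '] ++ s2) := by
  constructor
  · intro c hc
    cases hs : s1.head? with
    | none => simp [List.head?_eq_none_iff] at hs; exact absurd hs n1
    | some a =>
      rw [List.append_assoc, List.head?_append, hs] at hc
      simp at hc
      subst hc
      exact h1.1 a hs
  · intro c hc
    rw [List.getLast?_append_of_ne_nil _ n2] at hc
    exact h2.2 c hc

-- split₀ produces nonempty whitespace-free tokens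
theorem pvSplit₀_go_tokens (s : List Char) : ∀ (cur : List Char) (acc : List (List Char)),
    (∀ c ∈ cur, PySem.Chars.isspace c = false) →
    (∀ t ∈ acc, t ≠ [] ∧ ∀ c ∈ t, PySem.Chars.isspace c = false) →
    ∀ t ∈ PySem.Chars.split₀.go s cur acc, t ≠ [] ∧ ∀ c ∈ t, PySem.Chars.isspace c = false := by
  induction s with
  | nil =>
    intro cur acc hcur hacc t ht
    rw [PySem.Chars.split₀.go] at ht
    split at ht
    · exact hacc t (by simpa using ht)
    · next hne =>
      simp at ht
      rcases ht with ht | ht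
      · exact hacc t ht
      · subst ht
        refine ⟨by simpa [List.isEmpty_iff] using hne, ?_⟩
        intro c hcmem
        exact hcur c (by simpa using hcmem)
  | cons c rest ih =>
    intro cur acc hcur hacc t ht
    rw [PySem.Chars.split₀.go] at ht
    split at ht
    · next hsp =>
      split at ht
      · exact ih [] acc (by simp) hacc t ht
      · next hne =>
        refine ih [] _ (by simp) ?_ t ht
        intro u hu
        simp at hu
        rcases hu with hu | hu
        · subst hu
          refine ⟨by simpa [List.isEmpty_iff] using hne, ?_⟩
          intro d hd
          exact hcur d (by simpa using hd)
        · exact hacc u hu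
    · next hsp =>
      refine ih (c :: cur) acc ?_ hacc t ht
      intro d hd
      simp at hd
      rcases hd with hd | hd
      · subst hd; simpa using hsp
      · exact hcur d hd

theorem pvSplit₀_tokens (s : List Char) :
    ∀ t ∈ PySem.Chars.split₀ s, t ≠ [] ∧ ∀ c ∈ t, PySem.Chars.isspace c = false := by
  exact pvSplit₀_go_tokens s [] [] (by simp) (by simp)

theorem pvGood_of_token {t : List Char}
    (h : ∀ c ∈ t, PySem.Chars.isspace c = false) : pvGood t := by
  constructor
  · intro c hc
    exact h c (List.mem_of_mem_head? hc)
  · intro c hc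
    exact h c (List.mem_of_mem_getLast? hc)

theorem pvJoin_ne_nil {b : List Char} {ts : List (List Char)} (hb : b ≠ []) :
    PySem.Chars.join [' '] (b :: ts) ≠ [] := by
  cases ts with
  | nil => simpa [PySem.Chars.join_singleton] using hb
  | cons d ts => rw [PySem.Chars.join_cons_cons]; simp [hb]

theorem pvGood_join {ts : List (List Char)}
    (h : ∀ t ∈ ts, t ≠ [] ∧ ∀ c ∈ t, PySem.Chars.isspace c = false) :
    pvGood (PySem.Chars.join [' '] ts) := by
  induction ts with
  | nil =>
    constructor <;> intro c hc <;> simp [PySem.Chars.join, List.intercalate] at hc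
  | cons a ts ih =>
    cases ts with
    | nil =>
      rw [PySem.Chars.join_singleton]
      exact pvGood_of_token (h a (by simp)).2
    | cons b ts =>
      rw [PySem.Chars.join_cons_cons]
      have hrest := ih (by intro t ht; exact h t (by simp [ht]))
      have ha := h a (by simp)
      constructor
      · intro c hc
        cases hs : a.head? with
        | none => simp [List.head?_eq_none_iff] at hs; exact absurd hs ha.1
        | some x =>
          rw [List.append_assoc, List.head?_append, hs] at hc
          simp at hc
          subst hc
          exact (pvGood_of_token ha.2).1 x hs
      · intro c hc
        rw [List.getLast?_append_of_ne_nil _ (pvJoin_ne_nil (h b (by simp)).1)] at hc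
        exact hrest.2 c hc

-- characterization of A's loop from the empty sentence list
theorem pvLoopA_empty (cs buf : List Char) :
    pvLoopA cs [] buf =
      match cs.findIdx? pvIsTerm with
      | none => ([], buf ++ cs)
      | some i =>
          let s1 := PySem.Chars.strip (buf ++ cs.take (i+1))
          if 220 ≤ s1.length then ([s1], [])
          else pvLoopA (cs.drop (i+1)) [s1] [] := by
  induction cs generalizing buf with
  | nil => simp [pvLoopA]
  | cons c rest ih =>
    by_cases htc : pvIsTerm c = true
    · have hsp := pvTerm_not_space htc
      have hne : PySem.Chars.strip (buf ++ [c]) ≠ [] := by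
        rw [pvStrip_append_term hsp]; simp
      rw [pvLoopA]
      simp only [htc, if_true, List.findIdx?_cons, List.take_succ_cons, List.take_zero]
      simp [hne, PySem.Chars.join_singleton]
    · rw [pvLoopA]
      simp only [htc, if_false, Bool.false_eq_true]
      rw [ih (buf ++ [c])]
      simp only [List.findIdx?_cons, htc]
      cases hf : rest.findIdx? pvIsTerm with
      | none => simp
      | some j =>
        simp only [Option.map_some, Bool.false_eq_true, if_false]
        have ht : (c :: rest).take (j + 1 + 1) = c :: rest.take (j + 1) := List.take_succ_cons
        have hd : (c :: rest).drop (j + 1 + 1) = rest.drop (j + 1) := List.drop_succ_cons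
        simp [ht, hd]

-- characterization of A's loop once one sentence has been collected
theorem pvLoopA_one (cs : List Char) (s1 : List Char) : ∀ buf,
    pvLoopA cs [s1] buf =
      match cs.findIdx? pvIsTerm with
      | none => ([s1], buf ++ cs)
      | some i => ([s1, PySem.Chars.strip (buf ++ cs.take (i+1))], []) := by
  induction cs with
  | nil => intro buf; simp [pvLoopA]
  | cons c rest ih =>
    intro buf
    by_cases htc : pvIsTerm c = true
    · have hsp := pvTerm_not_space htc
      have hne : PySem.Chars.strip (buf ++ [c]) ≠ [] := by
        rw [pvStrip_append_term hsp]; simp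
      rw [pvLoopA]
      simp only [htc, if_true, List.findIdx?_cons, List.take_succ_cons, List.take_zero]
      simp [hne]
    · rw [pvLoopA]
      simp only [htc, if_false, Bool.false_eq_true]
      rw [ih (buf ++ [c])]
      simp only [List.findIdx?_cons, htc]
      cases hf : rest.findIdx? pvIsTerm with
      | none => simp
      | some j =>
        have ht : (c :: rest).take (j + 1 + 1) = c :: rest.take (j + 1) := List.take_succ_cons
        simp [ht]

-- characterization of B's scanner
theorem pvSplitGo_spec (cs : List Char) : ∀ n t, cs = t.drop n →
    pvSplitGo cs n t =
      match cs.findIdx? pvIsTerm with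
      | none => (none, t)
      | some j => (some (PySem.Chars.strip (t.take (n+j+1))), t.drop (n+j+1)) := by
  induction cs with
  | nil => intro n t _; simp [pvSplitGo]
  | cons c rest ih =>
    intro n t hnt
    by_cases htc : pvIsTerm c = true
    · rw [pvSplitGo]
      simp [htc, List.findIdx?_cons]
    · rw [pvSplitGo]
      simp only [htc, if_false, Bool.false_eq_true]
      have hrest : rest = t.drop (n + 1) := by
        have := congrArg List.tail hnt
        simpa [List.tail_drop] using this
      rw [ih (n+1) t hrest]
      simp only [List.findIdx?_cons, htc]
      cases hf : rest.findIdx? pvIsTerm with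
      | none => simp
      | some j =>
        simp only [Option.map_some, Bool.false_eq_true, if_false]
        have : n + 1 + j + 1 = n + (j + 1) + 1 := by omega
        simp [this]

-- ===== VERDICT (by name: the statement is the Claim_ definition above) =====
theorem extract_fallback_reply_text_py_spec : Claim_equal_extract_fallback_reply_text_py := by
  intro content _
  unfold Spec_extract_fallback_reply_text_py
  unfold extract_fallback_reply_text_py extract_fallback_reply_text_py_alt
  set nz := PySem.Chars.join [' '] (PySem.Chars.split₀ (PySem.Chars.strip content.toList)) with hnzdef
  have hgood : pvGood nz := pvGood_join (pvSplit₀_tokens _)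
  by_cases hnz : nz = []
  · simp [hnz]
  · simp only [hnz, if_false]
    have hA := pvLoopA_empty nz []
    have hB := pvSplitGo_spec nz 0 nz (by simp)
    cases hf : nz.findIdx? pvIsTerm with
    | none =>
      rw [hf] at hA hB
      simp only at hA hB
      rw [hA, hB]
      simp only [ne_eq, hnz, not_false_iff, and_true, List.nil_append, if_pos]
      rw [pvGood_strip_eq hgood]
      simp [hnz, PySem.Chars.join_singleton, pvGood_strip_eq hgood]
    | some i =>
      rw [hf] at hA hB
      simp only [List.nil_append] at hA
      obtain ⟨hilt, hterm, -⟩ := (List.findIdx?_eq_some_iff_getElem).1 hf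
      have htake : nz.take (i+1) = nz.take i ++ [nz[i]] := by
        rw [List.take_add_one]; simp [List.getElem?_eq_getElem hilt]
      have hs1 : PySem.Chars.strip (nz.take (i+1)) = PySem.Chars.lstrip (nz.take i) ++ [nz[i]] := by
        rw [htake, pvStrip_append_term (pvTerm_not_space hterm)]
      set s1 := PySem.Chars.strip (nz.take (i+1)) with hs1def
      have hs1ne : s1 ≠ [] := by rw [hs1]; simp
      have hgood1 : pvGood s1 := by rw [hs1]; exact pvGood_lstrip_append (pvTerm_not_space hterm)
      have hB' : pvSplitGo nz 0 nz = (some s1, nz.drop (i+1)) := by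
        rw [hB]; simp only [Nat.zero_add]; rw [← hs1def]
      rw [hA, hB']
      simp only
      by_cases hlen : 220 ≤ s1.length
      · simp only [hlen, if_pos]
        simp only [ne_eq, not_true_eq_false, List.cons_ne_self, and_false, if_false]
        have hfil : [s1].filter (fun t => !t.isEmpty) = [s1] := by
          simp [hs1ne]
        rw [hfil, PySem.Chars.join_singleton, pvGood_strip_eq hgood1]
        simp [hs1ne]
      · simp only [hlen, if_false]
        rw [pvLoopA_one (nz.drop (i+1)) s1 []]
        have hB2 := pvSplitGo_spec (nz.drop (i+1)) 0 (nz.drop (i+1)) (by simp)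
        cases hf2 : (nz.drop (i+1)).findIdx? pvIsTerm with
        | none =>
          rw [hf2] at hB2
          have hB2' : pvSplitGo (nz.drop (i+1)) 0 (nz.drop (i+1)) = (none, nz.drop (i+1)) := by
            rw [hB2]
          rw [hB2']
          simp only [List.nil_append]
          rw [if_neg (by simp : ¬(nz.drop (i+1) ≠ [] ∧ ([s1] : List (List Char)) = []))]
          have hfil : [s1].filter (fun t => !t.isEmpty) = [s1] := by
            simp [hs1ne]
          rw [hfil, PySem.Chars.join_singleton, pvGood_strip_eq hgood1]
          simp [hs1ne]
        | some j =>
          rw [hf2] at hB2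
          obtain ⟨hjlt, hterm2, -⟩ := (List.findIdx?_eq_some_iff_getElem).1 hf2
          set rest := nz.drop (i+1) with hrestdef
          have htake2 : rest.take (j+1) = rest.take j ++ [rest[j]] := by
            rw [List.take_add_one]; simp [List.getElem?_eq_getElem hjlt]
          have hs2 : PySem.Chars.strip (rest.take (j+1)) = PySem.Chars.lstrip (rest.take j) ++ [rest[j]] := by
            rw [htake2, pvStrip_append_term (pvTerm_not_space hterm2)]
          set s2 := PySem.Chars.strip (rest.take (j+1)) with hs2def
          have hs2ne : s2 ≠ [] := by rw [hs2]; simp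
          have hgood2 : pvGood s2 := by rw [hs2]; exact pvGood_lstrip_append (pvTerm_not_space hterm2)
          rw [hB2]
          simp only [List.nil_append, Nat.zero_add]
          rw [← hs2def]
          rw [if_neg (by simp : ¬(([] : List Char) ≠ [] ∧ ([s1, s2] : List (List Char)) = []))]
          have hfil : [s1, s2].filter (fun t => !t.isEmpty) = [s1, s2] := by
            simp [hs1ne, hs2ne]
          rw [hfil, PySem.Chars.join_cons_cons, PySem.Chars.join_singleton,
            pvGood_strip_eq (pvGood_mid hgood1 hgood2 hs1ne hs2ne)]
          simp [hs1ne]
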